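-- pv_equiv track=rewrite | github.com/getsentry/symx | symx/stats/coverage.py | _compare_int_tuple_desc
-- ===== SOURCE A (Python) =====
-- def _compare_int_tuple_desc(left: tuple[int, ...], right: tuple[int, ...]) -> int:
--     max_length = max(len(left), len(right))
--     for index in range(max_length):
--         left_value = left[index] if index < len(left) else -1
--         right_value = right[index] if index < len(right) else -1
--         if left_value > right_value:
--             return -1
--         if left_value < right_value:
--             return 1
--     return 0
-- ===== SOURCE B (Python) =====
-- def _compare_int_tuple_desc(left: tuple[int, ...], right: tuple[int, ...]) -> int:
--     n = max(len(left), len(right))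
--     l = left + (-1,) * (n - len(left))
--     r = right + (-1,) * (n - len(right))
--     return (l < r) - (l > r)
-- ===== Notes on version B (the rewrite author's own statement) =====
-- stated objective: idiomatic
-- what changed: Replaces the per-index loop with explicit defaults by padding both tuples to equal length with -1 and delegating the decision to Python's built-in lexicographic tuple comparison, returning (l < r) - (l > r).
import Mathlib
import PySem

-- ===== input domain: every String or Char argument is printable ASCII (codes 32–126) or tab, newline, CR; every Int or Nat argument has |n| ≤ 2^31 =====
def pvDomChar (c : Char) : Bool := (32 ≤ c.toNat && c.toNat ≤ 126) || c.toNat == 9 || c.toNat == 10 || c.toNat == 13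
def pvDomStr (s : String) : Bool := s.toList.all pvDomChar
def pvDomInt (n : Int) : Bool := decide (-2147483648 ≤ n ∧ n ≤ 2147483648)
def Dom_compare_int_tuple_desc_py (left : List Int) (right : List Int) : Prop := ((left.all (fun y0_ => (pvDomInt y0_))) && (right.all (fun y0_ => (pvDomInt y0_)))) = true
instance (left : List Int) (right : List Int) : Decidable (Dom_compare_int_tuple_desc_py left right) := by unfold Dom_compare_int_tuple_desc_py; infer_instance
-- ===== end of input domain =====

-- B pads both tuples to equal length with -1 and uses built-in lexicographic tuple comparison; same values as A's per-index loop.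

-- ===== PORT A =====
-- the for-loop of A: `index` counts up, `remaining` iterations left (range(max_length))
def pvAGo (left : List Int) (right : List Int) (index : Nat) : Nat → Int
  | 0 => 0
  | remaining + 1 =>
    let left_value : Int := if h : index < left.length then left[index] else -1
    let right_value : Int := if h : index < right.length then right[index] else -1
    if left_value > right_value then -1
    else if left_value < right_value then 1
    else pvAGo left right (index + 1) remaining

def compare_int_tuple_desc_py (left : List Int) (right : List Int) : Int :=
  pvAGo left right 0 (max left.length right.length)

-- ===== PORT B =====
-- Python's built-in lexicographic tuple comparison (returns Ordering)
def pvLexCmp : List Int → List Int → Ordering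
  | [], [] => .eq
  | [], _ :: _ => .lt
  | _ :: _, [] => .gt
  | a :: as_, b :: bs => match compare a b with
    | .eq => pvLexCmp as_ bs
    | o => o

def compare_int_tuple_desc_py_alt (left : List Int) (right : List Int) : Int :=
  let n := max left.length right.length
  let l := left ++ List.replicate (n - left.length) (-1)
  let r := right ++ List.replicate (n - right.length) (-1)
  -- (l < r) - (l > r)
  (if pvLexCmp l r = .lt then (1 : Int) else 0) - (if pvLexCmp l r = .gt then (1 : Int) else 0)

-- ===== PRECONDITION & SPEC =====
def Spec_compare_int_tuple_desc_py (left : List Int) (right : List Int) (out : Int) : Prop := out = compare_int_tuple_desc_py_alt left right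
instance (left : List Int) (right : List Int) (out : Int) : Decidable (Spec_compare_int_tuple_desc_py left right out) := by unfold Spec_compare_int_tuple_desc_py; infer_instance

-- ===== CLAIM (what is proved, stated in full; the proofs are below) =====
def Claim_equal_compare_int_tuple_desc_py : Prop := ∀ (left : List Int) (right : List Int), Dom_compare_int_tuple_desc_py left right → Spec_compare_int_tuple_desc_py left right (compare_int_tuple_desc_py left right)

-- ===== LEMMAS AND PROOFS =====

def pvOrd2Int (o : Ordering) : Int :=
  (if o = .lt then (1 : Int) else 0) - (if o = .gt then (1 : Int) else 0)

-- element of the padded list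
theorem pvPadGet (xs : List Int) (n i : Nat) (hx : xs.length ≤ n) (hi : i < n) :
    (xs ++ List.replicate (n - xs.length) (-1 : Int))[i]'(by
      simp [List.length_append, List.length_replicate]; omega) =
    (if h : i < xs.length then xs[i] else -1) := by
  by_cases h : i < xs.length
  · simp [List.getElem_append_left h, h]
  · rw [List.getElem_append_right (by omega)]
    simp [h]

theorem pvLexCmp_cons (a b : Int) (as_ bs : List Int) :
    pvLexCmp (a :: as_) (b :: bs) =
      (if a < b then .lt else if b < a then .gt else pvLexCmp as_ bs) := by
  rcases lt_trichotomy a b with h | h | h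
  · simp [pvLexCmp, Int.compare_eq_lt.mpr h, h, lt_asymm h]
  · subst h; simp [pvLexCmp, Int.compare_eq_eq.mpr rfl]
  · simp [pvLexCmp, Int.compare_eq_gt.mpr h, h, lt_asymm h]

theorem pvLoopLemma (left right : List Int) (n : Nat)
    (hl : left.length ≤ n) (hr : right.length ≤ n) :
    ∀ (remaining index : Nat), index + remaining = n →
      pvAGo left right index remaining =
        pvOrd2Int (pvLexCmp
          ((left ++ List.replicate (n - left.length) (-1 : Int)).drop index)
          ((right ++ List.replicate (n - right.length) (-1 : Int)).drop index)) := by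
  intro remaining
  induction remaining with
  | zero =>
    intro index h
    have h1 : (left ++ List.replicate (n - left.length) (-1 : Int)).length = n := by
      simp [List.length_append, List.length_replicate]; omega
    have h2 : (right ++ List.replicate (n - right.length) (-1 : Int)).length = n := by
      simp [List.length_append, List.length_replicate]; omega
    rw [List.drop_of_length_le (by omega), List.drop_of_length_le (by omega)]
    simp [pvAGo, pvLexCmp, pvOrd2Int]
  | succ k ih =>
    intro index h
    have hi : index < n := by omega
    have h1 : index < (left ++ List.replicate (n - left.length) (-1 : Int)).length := by
      simp [List.length_append, List.length_replicate]; omega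
    have h2 : index < (right ++ List.replicate (n - right.length) (-1 : Int)).length := by
      simp [List.length_append, List.length_replicate]; omega
    rw [List.drop_eq_getElem_cons h1, List.drop_eq_getElem_cons h2,
        pvPadGet left n index hl hi, pvPadGet right n index hr hi, pvLexCmp_cons]
    simp only [pvAGo]
    set lv : Int := if h : index < left.length then left[index] else -1
    set rv : Int := if h : index < right.length then right[index] else -1
    rcases lt_trichotomy lv rv with hc | hc | hc
    · simp [hc, not_lt_of_gt hc, pvOrd2Int]
    · simp [hc]
      exact ih (index + 1) (by omega)
    · simp [hc, not_lt_of_gt hc, pvOrd2Int]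

-- ===== VERDICT (by name: the statement is the Claim_ definition above) =====
theorem compare_int_tuple_desc_py_spec : Claim_equal_compare_int_tuple_desc_py := by
  intro left right _
  unfold Spec_compare_int_tuple_desc_py compare_int_tuple_desc_py compare_int_tuple_desc_py_alt
  have := pvLoopLemma left right (max left.length right.length)
    (le_max_left _ _) (le_max_right _ _) (max left.length right.length) 0 (by omega)
  simp only [List.drop_zero] at this
  rw [this]
  simp [pvOrd2Int]
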